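-- pv_equiv track=rewrite | github.com/Kucheriav/b2p_override | b2p_parser.py | split_student
-- ===== SOURCE A (Python) =====
-- def split_student(student: str):
--     student_splitted = list()
--     freaky_symbols = list()
--     cur_st = ''
--     for el in student:
--         if el.isprintable():
--             cur_st += el
--         else:
--             if cur_st:
--                 student_splitted.append(cur_st)
--                 cur_st = ''
--             freaky_symbols.append(el)
--     return student_splitted, freaky_symbols
-- ===== SOURCE B (Python) =====
-- def split_student(student: str):
--     words = []
--     symbols = []
--     start = 0
--     for i, ch in enumerate(student):
--         if not ch.isprintable():
--             if start < i:
--                 words.append(student[start:i])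
--             symbols.append(ch)
--             start = i + 1
--     return words, symbols
-- ===== Notes on version B (the rewrite author's own statement) =====
-- stated objective: alternative
-- what changed: B scans by index and emits each slice between consecutive non-printable delimiters instead of accumulating a current string character by character.
import Mathlib
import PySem

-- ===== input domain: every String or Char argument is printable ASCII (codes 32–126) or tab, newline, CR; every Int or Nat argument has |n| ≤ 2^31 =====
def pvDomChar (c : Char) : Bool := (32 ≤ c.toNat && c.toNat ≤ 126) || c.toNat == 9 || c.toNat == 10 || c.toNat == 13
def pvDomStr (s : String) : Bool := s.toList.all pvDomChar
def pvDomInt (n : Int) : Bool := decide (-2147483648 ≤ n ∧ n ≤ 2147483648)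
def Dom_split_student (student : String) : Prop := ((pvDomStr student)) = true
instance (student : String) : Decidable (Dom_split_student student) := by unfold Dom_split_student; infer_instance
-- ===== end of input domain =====

-- B replaces A's char-by-char string accumulator with an index scan that emits the
-- slice between consecutive non-printable delimiters (alternative decomposition, same cost).

-- Python's str.isprintable, exact on the stated printable-ASCII + tab/newline/CR domain.
def pvPrintable (c : Char) : Bool := 32 ≤ c.toNat && c.toNat ≤ 126

-- ===== PORT A =====
-- A's loop: state (student_splitted, freaky_symbols, cur_st).
def splitA : List Char → List String → List String → List Char → List String × List String
  | [], sp, fr, _cur => (sp, fr)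
  | c :: rest, sp, fr, cur =>
    if pvPrintable c then
      splitA rest sp fr (cur ++ [c])
    else if cur ≠ [] then
      splitA rest (sp ++ [String.ofList cur]) (fr ++ [String.ofList [c]]) []
    else
      splitA rest sp (fr ++ [String.ofList [c]]) []

def split_student (student : String) : List String × List String :=
  splitA student.toList [] [] []

-- ===== PORT B =====
-- B's loop over enumerate(student): state (words, symbols, start).
def splitB (cs : List Char) : List (Int × Char) → List String → List String → Int → List String × List String
  | [], ws, fs, _start => (ws, fs)
  | (i, c) :: rest, ws, fs, start =>
    if pvPrintable c then
      splitB cs rest ws fs start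
    else
      splitB cs rest
        (if start < i then ws ++ [String.ofList (PySem.List.slice cs (some start) (some i))] else ws)
        (fs ++ [String.ofList [c]]) (i + 1)

def split_student_alt (student : String) : List String × List String :=
  splitB student.toList (PySem.List.enumerate student.toList) [] [] 0

-- ===== PRECONDITION & SPEC =====
def Spec_split_student (student : String) (out : List String × List String) : Prop := out = split_student_alt student
instance (student : String) (out : List String × List String) : Decidable (Spec_split_student student out) := by unfold Spec_split_student; infer_instance

-- ===== CLAIM (what is proved, stated in full; the proofs are below) =====
def Claim_equal_split_student : Prop := ∀ (student : String), Dom_split_student student → Spec_split_student student (split_student student)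

-- ===== LEMMAS AND PROOFS =====

-- Main invariant: at position k with pending-segment start j (j ≤ k ≤ |cs|),
-- A's cur_st is exactly the slice cs[j:k], and the two loops agree from there on.
theorem splitA_eq_splitB (cs : List Char) :
    ∀ (l : List Char) (k j : Nat), j ≤ k → k ≤ cs.length → cs.drop k = l →
      ∀ (ws fs : List String),
        splitA l ws fs ((cs.drop j).take (k - j))
          = splitB cs (PySem.List.enumerate l (k : Int)) ws fs (j : Int) := by
  intro l
  induction l with
  | nil =>
    intro k j _ _ _ ws fs
    simp [splitA, PySem.List.enumerate, splitB]
  | cons c rest ih =>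
    intro k j hjk hk hdrop ws fs
    have hklen : k < cs.length := by
      by_contra h
      have : cs.drop k = [] := List.drop_eq_nil_of_le (by omega)
      simp [this] at hdrop
    have hdrop' : cs.drop (k + 1) = rest := by
      have : cs.drop (k + 1) = (cs.drop k).drop 1 := by
        rw [List.drop_drop]
      simp [this, hdrop]
    rw [PySem.List.enumerate_cons]
    by_cases hc : pvPrintable c = true
    · -- printable: A extends cur, B moves on with the same start
      have hcur : (cs.drop j).take (k - j) ++ [c] = (cs.drop j).take (k + 1 - j) := by
        have h1 : k + 1 - j = (k - j) + 1 := by omega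
        rw [h1, List.take_add]
        have h2 : (cs.drop j).drop (k - j) = cs.drop k := by
          rw [List.drop_drop]; congr 1; omega
        rw [h2, hdrop]
        simp
      simp only [splitA, splitB, hc, if_true]
      rw [hcur]
      have := ih (k + 1) j (by omega) (by omega) hdrop' ws fs
      simpa using this
    · -- non-printable: A flushes cur iff nonempty; B emits the slice iff start < i
      have hc' : pvPrintable c = false := by simpa using hc
      have hlen : ((cs.drop j).take (k - j)).length = k - j := by
        simp; omega
      have hslice : PySem.List.slice cs (some (j : Int)) (some (k : Int))
          = (cs.drop j).take (k - j) := PySem.List.slice_natCast cs j k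
      have hnext := ih (k + 1) (k + 1) le_rfl (by omega) hdrop'
      by_cases hlt : j < k
      · have hne : (cs.drop j).take (k - j) ≠ [] := by
          intro h; rw [h] at hlen; simp at hlen; omega
        have hltI : (j : Int) < (k : Int) := by exact_mod_cast hlt
        simp only [splitA, splitB, hc', Bool.false_eq_true, if_false, ne_eq, hne,
          not_false_eq_true, if_true, hslice]
        rw [if_pos hltI]
        have := hnext (ws ++ [String.ofList ((cs.drop j).take (k - j))]) (fs ++ [String.ofList [c]])
        simpa [Nat.sub_self] using this
      · have hjk0 : j = k := by omega
        subst hjk0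
        have hnil : (cs.drop j).take (j - j) = [] := by simp
        simp only [splitA, splitB, hc', Bool.false_eq_true, if_false, hnil, ne_eq,
          not_true_eq_false, if_false, lt_self_iff_false]
        have := hnext ws (fs ++ [String.ofList [c]])
        simpa [Nat.sub_self] using this

-- ===== VERDICT (by name: the statement is the Claim_ definition above) =====
theorem split_student_spec : Claim_equal_split_student := by
  intro student _
  unfold Spec_split_student split_student split_student_alt
  have := splitA_eq_splitB student.toList student.toList 0 0 le_rfl (by omega) (by simp) [] []
  simpa [PySem.List.enumerate] using this
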